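-- pv_equiv track=rewrite | github.com/Storm1seven/Competitive-Programming | Codechef/February Long Challenge/nochange.py | check
-- ===== SOURCE A (Python) =====
-- def check(n, p, a, counter):
--     s = 0
--     for i in range(n):
--         s+=counter[i]*a[i]
--     if s <= p:
--         return False
--     for i in range(n):
--         if counter[i]:
--             if s-a[i] < p:
--                 continue
--             else:
--                 return False
--     return True
-- ===== SOURCE B (Python) =====
-- def check(n, p, a, counter):
--     # Single fused pass: accumulate the total s and the minimum a[i] among
--     # indices with nonzero counter; the universal "remove-one" check collapses
--     # to one comparison against that minimum.
--     s = 0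
--     m = None
--     for i in range(n):
--         c = counter[i]
--         s += c * a[i]
--         if c and (m is None or a[i] < m):
--             m = a[i]
--     return s > p and (m is None or s - m < p)
-- ===== Notes on version B (the rewrite author's own statement) =====
-- stated objective: simpler
-- what changed: Replaces A's two passes (sum loop, then a per-element early-return loop checking s-a[i]<p for every present index) with one fused pass that tracks the sum and the minimum present a[i], ending in a single closed comparison s-min<p.
import Mathlib
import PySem

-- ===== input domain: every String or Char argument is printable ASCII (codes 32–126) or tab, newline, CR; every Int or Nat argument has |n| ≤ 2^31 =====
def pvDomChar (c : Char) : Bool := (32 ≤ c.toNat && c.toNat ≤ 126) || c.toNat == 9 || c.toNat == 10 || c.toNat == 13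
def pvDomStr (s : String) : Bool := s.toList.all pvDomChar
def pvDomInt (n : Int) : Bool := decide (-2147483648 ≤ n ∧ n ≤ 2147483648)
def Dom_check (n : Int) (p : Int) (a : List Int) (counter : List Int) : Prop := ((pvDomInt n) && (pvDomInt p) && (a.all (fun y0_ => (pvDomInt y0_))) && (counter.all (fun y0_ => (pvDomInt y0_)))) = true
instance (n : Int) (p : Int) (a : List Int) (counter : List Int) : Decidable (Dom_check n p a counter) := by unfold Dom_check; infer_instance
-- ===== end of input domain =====

-- B fuses A's two passes into one loop carrying (sum, minimum present a[i]) and ends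
-- with a single comparison; objective: simpler (the early-return check loop disappears).

-- ===== PORT A =====
-- second loop of A: early-return scan over the indices
def checkLoopA (s : Int) (p : Int) (a : List Int) (counter : List Int) : List Int → Bool
  | [] => true
  | i :: rest =>
    if PySem.List.pyGetD counter i 0 ≠ 0 then
      if s - PySem.List.pyGetD a i 0 < p then checkLoopA s p a counter rest
      else false
    else checkLoopA s p a counter rest

def check (n : Int) (p : Int) (a : List Int) (counter : List Int) : Bool :=
  let s := (PySem.List.pyRange 0 n 1).foldl
    (fun s i => s + PySem.List.pyGetD counter i 0 * PySem.List.pyGetD a i 0) 0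
  if s ≤ p then false
  else checkLoopA s p a counter (PySem.List.pyRange 0 n 1)

-- ===== PORT B =====
def check_alt (n : Int) (p : Int) (a : List Int) (counter : List Int) : Bool :=
  let st := (PySem.List.pyRange 0 n 1).foldl
    (fun (st : Int × Option Int) i =>
      let c := PySem.List.pyGetD counter i 0
      let x := PySem.List.pyGetD a i 0
      (st.1 + c * x,
       if c ≠ 0 then
         match st.2 with
         | none => some x
         | some m => if x < m then some x else some m
       else st.2))
    ((0 : Int), (none : Option Int))
  decide (st.1 > p) && (match st.2 with | none => true | some m => decide (st.1 - m < p))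

-- ===== PRECONDITION & SPEC =====
-- Pre_ excludes exactly the inputs where Python A raises IndexError (an index in range(n) past a or counter).
def Pre_check (n : Int) (p : Int) (a : List Int) (counter : List Int) : Prop :=
  n ≤ (a.length : Int) ∧ n ≤ (counter.length : Int)
instance (n : Int) (p : Int) (a : List Int) (counter : List Int) : Decidable (Pre_check n p a counter) := by unfold Pre_check; infer_instance
def pvWitness_check : Int × Int × List Int × List Int := (3, 4, [2, 1, 3], [1, 0, 2])

def Spec_check (n : Int) (p : Int) (a : List Int) (counter : List Int) (out : Bool) : Prop := out = check_alt n p a counter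
instance (n : Int) (p : Int) (a : List Int) (counter : List Int) (out : Bool) : Decidable (Spec_check n p a counter out) := by unfold Spec_check; infer_instance

-- ===== CLAIM (what is proved, stated in full; the proofs are below) =====
def Claim_equal_check : Prop := ∀ (n : Int) (p : Int) (a : List Int) (counter : List Int), Dom_check n p a counter → Pre_check n p a counter → Spec_check n p a counter (check n p a counter)

-- ===== LEMMAS AND PROOFS =====

-- B's pair fold splits into its two independent component folds
theorem foldl_pair_split (l : List Int) (counter a : List Int) (s0 : Int) (m0 : Option Int) :
    l.foldl (fun (st : Int × Option Int) i =>
      let c := PySem.List.pyGetD counter i 0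
      let x := PySem.List.pyGetD a i 0
      (st.1 + c * x,
       if c ≠ 0 then
         match st.2 with
         | none => some x
         | some m => if x < m then some x else some m
       else st.2))
      (s0, m0)
    = (l.foldl (fun s i => s + PySem.List.pyGetD counter i 0 * PySem.List.pyGetD a i 0) s0,
       l.foldl (fun m i =>
         if PySem.List.pyGetD counter i 0 ≠ 0 then
           match m with
           | none => some (PySem.List.pyGetD a i 0)
           | some m' => if PySem.List.pyGetD a i 0 < m' then some (PySem.List.pyGetD a i 0) else some m'
         else m) m0) := by
  induction l generalizing s0 m0 with
  | nil => rfl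
  | cons i rest ih => simp only [List.foldl_cons]; exact ih _ _

-- A's early-return scan, conjoined with the test of the incoming accumulator,
-- equals the test of B's running-minimum fold
theorem loopA_eq_minFold (s p : Int) (a counter : List Int) (l : List Int) (m0 : Option Int) :
    (checkLoopA s p a counter l &&
      (match m0 with | none => true | some m => decide (s - m < p)))
    = (match l.foldl (fun m i =>
         if PySem.List.pyGetD counter i 0 ≠ 0 then
           match m with
           | none => some (PySem.List.pyGetD a i 0)
           | some m' => if PySem.List.pyGetD a i 0 < m' then some (PySem.List.pyGetD a i 0) else some m'
         else m) m0 with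
       | none => true | some m => decide (s - m < p)) := by
  induction l generalizing m0 with
  | nil => cases m0 <;> simp [checkLoopA]
  | cons i rest ih =>
    rw [List.foldl_cons]
    by_cases hc : PySem.List.pyGetD counter i 0 ≠ 0
    · rw [if_pos hc, ← ih]
      cases m0 with
      | none =>
        simp only [checkLoopA, if_pos hc]
        by_cases hx : s - PySem.List.pyGetD a i 0 < p <;> simp [hx]
      | some m =>
        simp only [checkLoopA, if_pos hc]
        by_cases hlt : PySem.List.pyGetD a i 0 < m <;>
          by_cases hx : s - PySem.List.pyGetD a i 0 < p <;>
            simp [hlt, hx] <;> omega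
    · rw [if_neg hc, ← ih]
      simp only [checkLoopA, if_neg hc]

-- ===== VERDICT (by name: the statement is the Claim_ definition above) =====
theorem check_spec : Claim_equal_check := by
  intro n p a counter _ _
  unfold Spec_check check check_alt
  rw [foldl_pair_split]
  set s := (PySem.List.pyRange 0 n 1).foldl
    (fun s i => s + PySem.List.pyGetD counter i 0 * PySem.List.pyGetD a i 0) 0 with hs
  by_cases h : s ≤ p
  · simp [h, show ¬ s > p by omega]
  · have hgt : s > p := by omega
    simp only [if_neg h, hgt, decide_true, Bool.true_and]
    have := loopA_eq_minFold s p a counter (PySem.List.pyRange 0 n 1) none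
    simpa using this
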